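-- pv_equiv track=rewrite | github.com/zackaryuu/repodump | dump/17d447e6-a8e2-4cec-a6ad-f2e0736936ba/[202502] zuu/src/zuu/UTILS/smart_query.py | _parse_symbols_logic2
-- ===== SOURCE A (Python) =====
-- def _parse_symbols_logic2(query: str):
--     in_quote = False
--     current_quote = None
--     i = 0
--     while i < len(query):
--         char = query[i]
--         if char in "\"'":
--             if not in_quote:
--                 current_quote = char
--                 in_quote = True
--             elif char == current_quote:
--                 in_quote = False
--             i += 1
--             continue
--
--         if not in_quote and char in "&|!":
--             if char == "&":
--                 query = query[:i] + " and " + query[i + 1 :]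
--                 i += 5
--             elif char == "|":
--                 query = query[:i] + " or " + query[i + 1 :]
--                 i += 4
--             elif char == "!":
--                 query = query[:i] + " not " + query[i + 1 :]
--                 i += 5
--         else:
--             i += 1
--
--     return query
-- ===== SOURCE B (Python) =====
-- def _parse_symbols_logic2(query: str):
--     repl = {"&": " and ", "|": " or ", "!": " not "}
--     out = []
--     i = 0
--     n = len(query)
--     while i < n:
--         c = query[i]
--         if c in "\"'":
--             j = query.find(c, i + 1)
--             if j == -1:
--                 out.append(query[i:])
--                 i = n
--             else:
--                 out.append(query[i : j + 1])
--                 i = j + 1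
--         elif c in repl:
--             out.append(repl[c])
--             i += 1
--         else:
--             out.append(c)
--             i += 1
--     return "".join(out)
-- ===== Notes on version B (the rewrite author's own statement) =====
-- stated objective: alternative
-- what changed: A repeatedly splices replacement text into the query string in place while tracking an in_quote/current_quote state machine; B makes a single pass that copies each whole quoted span at once (located via find) and appends pieces to an output buffer joined at the end.
import Mathlib
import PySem

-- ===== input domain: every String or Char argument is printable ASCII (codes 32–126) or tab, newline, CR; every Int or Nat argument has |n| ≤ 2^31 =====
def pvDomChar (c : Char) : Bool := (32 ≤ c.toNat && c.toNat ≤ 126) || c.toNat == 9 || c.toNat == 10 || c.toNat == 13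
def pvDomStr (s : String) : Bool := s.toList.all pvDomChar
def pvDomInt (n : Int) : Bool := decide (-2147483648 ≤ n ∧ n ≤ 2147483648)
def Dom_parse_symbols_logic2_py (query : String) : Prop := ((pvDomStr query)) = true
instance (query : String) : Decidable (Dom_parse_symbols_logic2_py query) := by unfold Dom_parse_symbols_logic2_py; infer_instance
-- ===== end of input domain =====

-- B replaces A's in-place string splicing and quote-state machine by a single pass that
-- copies each whole quoted span at once and emits pieces into an output buffer (alternative structure, same cost).

-- ===== PORT A =====
-- literal port of A's while loop: the string is spliced in place and i jumps past the inserted text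
def pyLoopA (q : List Char) (inq : Bool) (cq : Option Char) (i : Nat) : List Char :=
  if h : i < q.length then
    let c := q[i]
    if c = '"' ∨ c = '\'' then
      if inq = false then pyLoopA q true (some c) (i+1)
      else if some c = cq then pyLoopA q false cq (i+1)
      else pyLoopA q inq cq (i+1)
    else if inq = false ∧ (c = '&' ∨ c = '|' ∨ c = '!') then
      if c = '&' then pyLoopA (q.take i ++ (" and ").toList ++ q.drop (i+1)) inq cq (i+5)
      else if c = '|' then pyLoopA (q.take i ++ (" or ").toList ++ q.drop (i+1)) inq cq (i+4)
      else pyLoopA (q.take i ++ (" not ").toList ++ q.drop (i+1)) inq cq (i+5)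
    else pyLoopA q inq cq (i+1)
  else q
termination_by q.length - i
decreasing_by
  all_goals (try simp [List.length_take, List.length_drop])
  all_goals omega

def parse_symbols_logic2_py (query : String) : String :=
  String.ofList (pyLoopA query.toList false none 0)

-- ===== PORT B =====
-- port of Source B: one pass; a quoted span is located with find/idxOf? and copied wholesale
def pyLoopB (xs : List Char) : List Char :=
  match xs with
  | [] => []
  | c :: t =>
    if c = '"' ∨ c = '\'' then
      match t.idxOf? c with
      | none => c :: t
      | some j => (c :: t.take (j+1)) ++ pyLoopB (t.drop (j+1))
    else if c = '&' then (" and ").toList ++ pyLoopB t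
    else if c = '|' then (" or ").toList ++ pyLoopB t
    else if c = '!' then (" not ").toList ++ pyLoopB t
    else c :: pyLoopB t
termination_by xs.length
decreasing_by
  all_goals simp [List.length_drop]

def parse_symbols_logic2_py_alt (query : String) : String :=
  String.ofList (pyLoopB query.toList)

-- ===== PRECONDITION & SPEC =====
def Spec_parse_symbols_logic2_py (query : String) (out : String) : Prop := out = parse_symbols_logic2_py_alt query
instance (query : String) (out : String) : Decidable (Spec_parse_symbols_logic2_py query out) := by unfold Spec_parse_symbols_logic2_py; infer_instance

-- ===== CLAIM (what is proved, stated in full; the proofs are below) =====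
def Claim_equal_parse_symbols_logic2_py : Prop := ∀ (query : String), Dom_parse_symbols_logic2_py query → Spec_parse_symbols_logic2_py query (parse_symbols_logic2_py query)

-- ===== LEMMAS AND PROOFS =====

-- "inside a quote opened by c": copy up to and including the closing c, then resume pyLoopB
def skipQ (c : Char) (xs : List Char) : List Char :=
  match xs.idxOf? c with
  | none => xs
  | some j => xs.take (j+1) ++ pyLoopB (xs.drop (j+1))

theorem idxOf?_cons_self {c : Char} {t : List Char} : (c :: t).idxOf? c = some 0 := by
  simp [List.idxOf?, List.findIdx?_cons]

theorem idxOf?_cons_ne {c d : Char} {t : List Char} (h : d ≠ c) :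
    (d :: t).idxOf? c = (t.idxOf? c).map (· + 1) := by
  simp [List.idxOf?, List.findIdx?_cons, beq_iff_eq, h]

theorem skipQ_cons_ne {c d : Char} {t : List Char} (h : d ≠ c) :
    skipQ c (d :: t) = d :: skipQ c t := by
  unfold skipQ
  rw [idxOf?_cons_ne h]
  cases t.idxOf? c with
  | none => simp
  | some j => simp

theorem pyLoopB_quote {c : Char} {t : List Char} (h : c = '"' ∨ c = '\'') :
    pyLoopB (c :: t) = c :: skipQ c t := by
  rw [pyLoopB, if_pos h]
  unfold skipQ
  cases t.idxOf? c with
  | none => simp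
  | some j => simp

theorem pyLoopB_and {t : List Char} : pyLoopB ('&' :: t) = (" and ").toList ++ pyLoopB t := by
  rw [pyLoopB, if_neg (by decide), if_pos rfl]

theorem pyLoopB_or {t : List Char} : pyLoopB ('|' :: t) = (" or ").toList ++ pyLoopB t := by
  rw [pyLoopB, if_neg (by decide), if_neg (by decide), if_pos rfl]

theorem pyLoopB_not {t : List Char} : pyLoopB ('!' :: t) = (" not ").toList ++ pyLoopB t := by
  rw [pyLoopB, if_neg (by decide), if_neg (by decide), if_neg (by decide), if_pos rfl]

theorem main_inv (n : Nat) : ∀ (q : List Char) (i : Nat), q.length - i ≤ n → i ≤ q.length →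
    (∀ (cq : Option Char), pyLoopA q false cq i = q.take i ++ pyLoopB (q.drop i)) ∧
    (∀ (c : Char), (c = '"' ∨ c = '\'') → pyLoopA q true (some c) i = q.take i ++ skipQ c (q.drop i)) := by
  induction n with
  | zero =>
    intro q i hn hi
    have hiq : i = q.length := by omega
    constructor
    · intro cq
      rw [pyLoopA]
      simp [hiq, pyLoopB]
    · intro c _
      rw [pyLoopA]
      simp [hiq, skipQ]
  | succ n ih =>
    intro q i hn hi
    by_cases hlt : i < q.length
    · have hdrop : q.drop i = q[i] :: q.drop (i+1) := List.drop_eq_getElem_cons hlt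
      have htake : q.take (i+1) = q.take i ++ [q[i]] := by
        rw [List.take_add_one]; simp [hlt]
      have hrec := ih q (i+1) (by omega) (by omega)
      constructor
      · intro cq
        rw [pyLoopA]
        simp only [hlt, dif_pos]
        by_cases hq : q[i] = '"' ∨ q[i] = '\''
        · rw [if_pos hq, if_pos trivial]
          rw [(hrec).2 q[i] hq]
          rw [hdrop, pyLoopB_quote hq, htake, List.append_assoc, List.singleton_append]
        · rw [if_neg hq]
          by_cases hop : q[i] = '&' ∨ q[i] = '|' ∨ q[i] = '!'
          · rw [if_pos ⟨trivial, hop⟩]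
            -- replacement branches: the spliced string q' satisfies the invariant at i + len(repl)
            have splice : ∀ (r : List Char), ¬(r = []) →
                pyLoopA (q.take i ++ r ++ q.drop (i+1)) false cq (i + r.length)
                  = q.take i ++ r ++ pyLoopB (q.drop (i+1)) := by
              intro r hr
              have hlen : (q.take i ++ r ++ q.drop (i+1)).length = i + r.length + (q.length - (i+1)) := by
                simp [List.length_take, List.length_drop]; omega
              have h1 := (ih (q.take i ++ r ++ q.drop (i+1)) (i + r.length)
                (by rw [hlen]; omega) (by rw [hlen]; omega)).1 cq
              rw [h1]
              have e1 : (q.take i ++ r ++ q.drop (i+1)).take (i + r.length) = q.take i ++ r := by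
                rw [List.take_append_of_le_length (by simp [List.length_take]; omega)]
                rw [List.take_of_length_le (by simp [List.length_take]; try omega)]
              have e2 : (q.take i ++ r ++ q.drop (i+1)).drop (i + r.length) = q.drop (i+1) := by
                rw [List.drop_append_of_le_length (by simp [List.length_take]; omega)]
                rw [List.drop_of_length_le (by simp [List.length_take]; try omega)]
                simp
              rw [e1, e2, List.append_assoc]
            rcases hop with h1 | h1 | h1
            · rw [if_pos h1]
              have := splice (" and ").toList (by decide)
              simp only [show (" and ").toList.length = 5 from rfl] at this
              rw [this, hdrop, h1]
              rw [pyLoopB_and]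
              simp
            · rw [if_neg (by simp [h1]), if_pos h1]
              have := splice (" or ").toList (by decide)
              simp only [show (" or ").toList.length = 4 from rfl] at this
              rw [this, hdrop, h1]
              rw [pyLoopB_or]
              simp
            · have hne1 : ¬(q[i] = '&') := by rw [h1]; decide
              have hne2 : ¬(q[i] = '|') := by rw [h1]; decide
              rw [if_neg hne1, if_neg hne2]
              have := splice (" not ").toList (by decide)
              simp only [show (" not ").toList.length = 5 from rfl] at this
              rw [this, hdrop, h1]
              rw [pyLoopB_not]
              simp
          · rw [if_neg (by simp [hop])]
            rw [hrec.1 cq, hdrop, htake]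
            have : pyLoopB (q[i] :: q.drop (i+1)) = q[i] :: pyLoopB (q.drop (i+1)) := by
              rw [pyLoopB, if_neg hq]
              rw [not_or, not_or] at hop
              rw [if_neg hop.1, if_neg hop.2.1, if_neg hop.2.2]
            rw [this, List.append_assoc, List.singleton_append]
      · intro c hc
        rw [pyLoopA]
        simp only [hlt, dif_pos]
        by_cases hq : q[i] = '"' ∨ q[i] = '\''
        · rw [if_pos hq]
          rw [if_neg (by decide)]
          by_cases heq : q[i] = c
          · rw [if_pos (by rw [heq]), hrec.1 (some c)]
            rw [hdrop, htake, heq]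
            unfold skipQ
            rw [idxOf?_cons_self]
            simp
          · rw [if_neg (by simpa using heq)]
            rw [hrec.2 c hc, hdrop, htake, skipQ_cons_ne heq, List.append_assoc, List.singleton_append]
        · rw [if_neg hq, if_neg (fun h => Bool.noConfusion h.1)]
          rw [hrec.2 c hc, hdrop, htake]
          have hne : q[i] ≠ c := by
            intro h; rcases hc with hc | hc <;> exact hq (by rw [h, hc]; simp)
          rw [skipQ_cons_ne hne, List.append_assoc, List.singleton_append]
    · have hiq : i = q.length := by omega
      constructor
      · intro cq
        rw [pyLoopA]; simp [hiq, pyLoopB]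
      · intro c _
        rw [pyLoopA]; simp [hiq, skipQ]

-- ===== VERDICT (by name: the statement is the Claim_ definition above) =====
theorem parse_symbols_logic2_py_spec : Claim_equal_parse_symbols_logic2_py := by
  intro query _
  unfold Spec_parse_symbols_logic2_py parse_symbols_logic2_py parse_symbols_logic2_py_alt
  have := (main_inv query.toList.length query.toList 0 (by omega) (by omega)).1 none
  rw [this]
  simp
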